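-- pv_equiv track=rewrite | github.com/victoria-parker/codewars | python-solutions/help-suzuki-count-his-vegetables.py | count_vegetables
-- ===== SOURCE A (Python) =====
-- def count_vegetables(string):
--     vegetables_list =string.split()
--
--     vegetables_count = {}
--
--     for item in vegetables_list:
--         if item not in ["cabbage", "carrot", "celery", "cucumber", "mushroom", "onion", "pepper", "potato", "tofu", "turnip"]:
--             continue
--         vegetables_count[item] = vegetables_count.get(item,0) + 1
--
--     items=[(t[1], t[0]) for t in vegetables_count.items()]
--
--     return sorted(items,key=lambda x: (x[0],x[1]), reverse=True)
-- ===== SOURCE B (Python) =====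
-- def count_vegetables(string):
--     recognized = ("cabbage", "carrot", "celery", "cucumber", "mushroom",
--                   "onion", "pepper", "potato", "tofu", "turnip")
--     words = sorted(w for w in string.split() if w in recognized)
--     pairs = []
--     for w in words:
--         if pairs and pairs[-1][1] == w:
--             pairs[-1] = (pairs[-1][0] + 1, w)
--         else:
--             pairs.append((1, w))
--     return sorted(pairs, key=lambda x: (x[0], x[1]), reverse=True)
-- ===== Notes on version B (the rewrite author's own statement) =====
-- stated objective: alternative
-- what changed: Replaces the dict-accumulation count (membership-filtered hash-map updates, then sort) with sort-then-group counting: filter the tokens to the recognized vegetables, sort them alphabetically, and run-length-encode the sorted list into (count, name) pairs before the final reverse sort.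
import Mathlib
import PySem

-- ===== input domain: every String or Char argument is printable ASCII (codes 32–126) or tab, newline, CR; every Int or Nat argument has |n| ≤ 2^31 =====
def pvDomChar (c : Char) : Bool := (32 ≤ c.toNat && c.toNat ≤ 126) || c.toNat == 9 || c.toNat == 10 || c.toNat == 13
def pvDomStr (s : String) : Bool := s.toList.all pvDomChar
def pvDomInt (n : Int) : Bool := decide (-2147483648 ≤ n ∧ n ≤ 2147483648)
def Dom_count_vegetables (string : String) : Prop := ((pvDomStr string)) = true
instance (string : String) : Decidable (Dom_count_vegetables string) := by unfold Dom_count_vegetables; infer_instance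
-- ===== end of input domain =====

-- B replaces A's dict-accumulation count with filter → alphabetical sort → run-length grouping; alternative decomposition, same cost.

-- shared literal: the recognized vegetable names (A's membership list / B's tuple)
def vegNames : List String :=
  ["cabbage", "carrot", "celery", "cucumber", "mushroom", "onion", "pepper", "potato", "tofu", "turnip"]

-- ===== PORT A =====
def count_vegetables (string : String) : List (Int × String) :=
  let vegetables_list := PySem.Str.split₀ string
  let vegetables_count : PySem.Dict String Int :=
    vegetables_list.foldl
      (fun d item =>
        if item ∉ vegNames then d
        else d.insert item (d.getD item 0 + 1))
      PySem.Dict.empty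
  let items := vegetables_count.items.map (fun t => (t.2, t.1))
  PySem.List.sorted2 items (fun x => x.1) (fun x => x.2) true

-- ===== PORT B =====
-- Source B's run-length accumulation step: merge into the last pair if it has the same word
def rstep (pairs : List (Int × String)) (w : String) : List (Int × String) :=
  match pairs.getLast? with
  | some p => if p.2 == w then pairs.dropLast ++ [(p.1 + 1, w)] else pairs ++ [(1, w)]
  | none => pairs ++ [(1, w)]

def count_vegetables_alt (string : String) : List (Int × String) :=
  let words := PySem.List.sorted ((PySem.Str.split₀ string).filter (fun w => decide (w ∈ vegNames))) (fun w => w) false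
  let pairs := words.foldl rstep ([] : List (Int × String))
  PySem.List.sorted2 pairs (fun x => x.1) (fun x => x.2) true

-- ===== PRECONDITION & SPEC =====
def Spec_count_vegetables (string : String) (out : List (Int × String)) : Prop := out = count_vegetables_alt string
instance (string : String) (out : List (Int × String)) : Decidable (Spec_count_vegetables string out) := by unfold Spec_count_vegetables; infer_instance

-- ===== CLAIM (what is proved, stated in full; the proofs are below) =====
def Claim_equal_count_vegetables : Prop := ∀ (string : String), Dom_count_vegetables string → Spec_count_vegetables string (count_vegetables string)

-- ===== LEMMAS AND PROOFS =====

-- the reverse=True (count, name) comparison used by both final sorts, as a Prop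
def pvLexGt (a b : Int × String) : Prop := b.1 < a.1 ∨ (¬ a.1 < b.1 ∧ b.2 < a.2)

lemma pvLexGt_asymm (a b : Int × String) : pvLexGt a b → ¬ pvLexGt b a := by
  rcases a with ⟨a1, a2⟩; rcases b with ⟨b1, b2⟩
  unfold pvLexGt
  rintro (h | ⟨h1, h2⟩) (h' | ⟨h1', h2'⟩)
  · omega
  · exact h1' h
  · exact h1 h'
  · exact lt_asymm h2 h2'

lemma pvLexGt_trans (a b c : Int × String) : pvLexGt a b → pvLexGt b c → pvLexGt a c := by
  rcases a with ⟨a1, a2⟩; rcases b with ⟨b1, b2⟩; rcases c with ⟨c1, c2⟩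
  unfold pvLexGt
  rintro (h | ⟨h1, h2⟩) (h' | ⟨h1', h2'⟩)
  · left; omega
  · left; omega
  · left; omega
  · right; exact ⟨by omega, lt_trans h2' h2⟩

lemma pvLexGt_conn (a b : Int × String) : ¬ pvLexGt a b → ¬ pvLexGt b a → a = b := by
  rcases a with ⟨a1, a2⟩; rcases b with ⟨b1, b2⟩
  unfold pvLexGt
  intro h h'
  have h1 : ¬ b1 < a1 := fun hh => h (Or.inl hh)
  have h1' : ¬ a1 < b1 := fun hh => h' (Or.inl hh)
  have e1 : a1 = b1 := by omega
  subst e1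
  have h2 : ¬ b2 < a2 := fun hh => h (Or.inr ⟨h1', hh⟩)
  have h2' : ¬ a2 < b2 := fun hh => h' (Or.inr ⟨h1, hh⟩)
  have e2 : a2 = b2 := le_antisymm (not_lt.mp h2) (not_lt.mp h2')
  simp [e2]

-- sorted2 with the full (fst, snd) key is determined by the multiset of elements
def pvBefore (a b : Int × String) : Bool :=
  decide (b.1 < a.1) || (!decide (a.1 < b.1) && decide (b.2 < a.2))

lemma pvBefore_iff (a b : Int × String) : pvBefore a b = true ↔ pvLexGt a b := by
  simp [pvBefore, pvLexGt]

lemma insertBy_pairwise_pv (x : Int × String) (ys : List (Int × String))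
    (h : ys.Pairwise (fun a b => ¬ pvLexGt b a)) :
    (PySem.List.insertBy pvBefore x ys).Pairwise (fun a b => ¬ pvLexGt b a) := by
  induction ys with
  | nil => simp [PySem.List.insertBy]
  | cons y ys ih =>
    rw [List.pairwise_cons] at h
    by_cases hxy : pvLexGt x y
    · rw [PySem.List.insertBy, if_pos ((pvBefore_iff x y).mpr hxy)]
      refine List.pairwise_cons.mpr ⟨?_, List.pairwise_cons.mpr ⟨h.1, h.2⟩⟩
      intro z hz
      rcases List.mem_cons.mp hz with hz | hz
      · intro hc; exact pvLexGt_asymm x y hxy (hz ▸ hc)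
      · intro hc
        exact h.1 z hz (pvLexGt_trans z x y hc hxy)
    · rw [PySem.List.insertBy,
        if_neg (fun hc => hxy ((pvBefore_iff x y).mp hc))]
      refine List.pairwise_cons.mpr ⟨?_, ih h.2⟩
      intro z hz
      rcases (PySem.List.mem_insertBy _ x z ys).mp hz with hz | hz
      · subst hz; exact hxy
      · exact h.1 z hz

lemma foldl_insertBy_pairwise_pv (xs : List (Int × String)) :
    ∀ (acc : List (Int × String)), acc.Pairwise (fun a b => ¬ pvLexGt b a) →
    (xs.foldl (fun acc x => PySem.List.insertBy pvBefore x acc) acc).Pairwise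
      (fun a b => ¬ pvLexGt b a) := by
  induction xs with
  | nil => intro acc h; simpa using h
  | cons x xs ih =>
    intro acc h
    exact ih _ (insertBy_pairwise_pv x acc h)

lemma sorted2_rev_eq_foldl (xs : List (Int × String)) :
    PySem.List.sorted2 xs (fun x => x.1) (fun x => x.2) true
      = xs.foldl (fun acc x => PySem.List.insertBy pvBefore x acc) [] := by
  unfold PySem.List.sorted2
  congr 1

lemma sorted2_rev_congr_perm (xs ys : List (Int × String)) (h : xs.Perm ys) :
    PySem.List.sorted2 xs (fun x => x.1) (fun x => x.2) true
      = PySem.List.sorted2 ys (fun x => x.1) (fun x => x.2) true := by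
  rw [sorted2_rev_eq_foldl, sorted2_rev_eq_foldl]
  have px : (xs.foldl (fun acc x => PySem.List.insertBy pvBefore x acc) []).Perm xs := by
    simpa using PySem.List.foldl_insertBy_perm pvBefore xs []
  have py : (ys.foldl (fun acc x => PySem.List.insertBy pvBefore x acc) []).Perm ys := by
    simpa using PySem.List.foldl_insertBy_perm pvBefore ys []
  refine List.Perm.eq_of_pairwise (le := fun a b => ¬ pvLexGt b a) ?_ ?_ ?_ (px.trans (h.trans py.symm))
  · intro a b _ _ hab hba
    exact (pvLexGt_conn b a hab hba).symm
  · exact foldl_insertBy_pairwise_pv xs [] (by simp)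
  · exact foldl_insertBy_pairwise_pv ys [] (by simp)

-- ordered dedup by repeated filtering (first occurrences)
def keysOf : List String → List String
  | [] => []
  | x :: xs => x :: keysOf (xs.filter (fun y => decide (y ≠ x)))
termination_by l => l.length
decreasing_by
  simp only [List.length_cons, List.length_unattach]
  exact Nat.lt_succ_of_le (le_trans (List.length_filter_le _ _) (by simp))

lemma mem_keysOf (l : List String) (y : String) : y ∈ keysOf l ↔ y ∈ l := by
  induction l using keysOf.induct with
  | case1 => simp [keysOf]
  | case2 x xs ih =>
    rw [List.unattach_filter (g := fun y => decide (y ≠ x)) (hf := fun _ _ => rfl),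
      List.unattach_attach] at ih
    rw [keysOf]
    simp only [List.mem_cons, ih, List.mem_filter, decide_eq_true_eq]
    by_cases hyx : y = x <;> simp [hyx]

lemma nodup_keysOf (l : List String) : (keysOf l).Nodup := by
  induction l using keysOf.induct with
  | case1 => simp [keysOf]
  | case2 x xs ih =>
    rw [List.unattach_filter (g := fun y => decide (y ≠ x)) (hf := fun _ _ => rfl),
      List.unattach_attach] at ih
    rw [keysOf]
    refine List.nodup_cons.mpr ⟨?_, ih⟩
    rw [mem_keysOf]
    simp

-- run-length encoding of a ≤-sorted list, generalized over the accumulator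
lemma run_lemma (ws : List String) : ∀ (pre : List (Int × String)) (c : Int) (w : String),
    ws.Pairwise (· ≤ ·) → (∀ x ∈ ws, w ≤ x) →
    ws.foldl rstep (pre ++ [(c, w)]) =
      pre ++ (c + (ws.count w : Int), w) ::
        (keysOf (ws.filter (fun y => decide (y ≠ w)))).map (fun k => ((ws.count k : Int), k)) := by
  induction ws with
  | nil => intro pre c w _ _; simp [keysOf]
  | cons x ws ih =>
    intro pre c w h1 h2
    rw [List.foldl_cons]
    by_cases hxw : x = w
    · subst hxw
      have hstep : rstep (pre ++ [(c, x)]) x = pre ++ [(c + 1, x)] := by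
        simp [rstep]
      rw [hstep, ih pre (c + 1) x (List.Pairwise.of_cons h1) (fun y hy => List.rel_of_pairwise_cons h1 hy)]
      have hfil : (x :: ws).filter (fun y => decide (y ≠ x)) = ws.filter (fun y => decide (y ≠ x)) := by
        simp
      rw [hfil]
      congr 1
      congr 1
      · simp [List.count_cons_self]
        ring
      · apply List.map_congr_left
        intro k hk
        have hkx : k ≠ x := by
          have := (mem_keysOf _ k).mp hk
          have := List.mem_filter.mp this
          simpa using this.2
        simp [Ne.symm hkx]
    · have hstep : rstep (pre ++ [(c, w)]) x = (pre ++ [(c, w)]) ++ [(1, x)] := by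
        have hne : w ≠ x := Ne.symm hxw
        simp [rstep, hne]
      rw [hstep, ih (pre ++ [(c, w)]) 1 x (List.Pairwise.of_cons h1) (fun y hy => List.rel_of_pairwise_cons h1 hy)]
      have hwx : w < x := lt_of_le_of_ne (h2 x List.mem_cons_self) (fun e => hxw e.symm)
      have hws : ∀ y ∈ ws, x ≤ y := fun y hy => List.rel_of_pairwise_cons h1 hy
      have hwnot : w ∉ ws := fun hm => absurd (hws w hm) (not_le.mpr hwx)
      have hcw : (x :: ws).count w = 0 := by
        rw [List.count_eq_zero]
        simp [hwnot, Ne.symm hxw]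
      have hfil1 : (x :: ws).filter (fun y => decide (y ≠ w)) = x :: ws := by
        rw [List.filter_eq_self]
        intro a ha
        rcases List.mem_cons.mp ha with ha | ha
        · subst ha; simp [hxw]
        · have hne : a ≠ w := fun e => hwnot (e ▸ ha)
          simp [hne]
      rw [hcw, hfil1, keysOf]
      have hmap : ((keysOf (ws.filter (fun y => decide (y ≠ x)))).map
            (fun k => (((x :: ws).count k : Int), k)))
          = (keysOf (ws.filter (fun y => decide (y ≠ x)))).map (fun k => ((ws.count k : Int), k)) := by
        apply List.map_congr_left
        intro k hk
        have hkx : k ≠ x := by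
          have := (mem_keysOf _ k).mp hk
          have := List.mem_filter.mp this
          simpa using this.2
        simp [Ne.symm hkx]
      simp only [List.map_cons, hmap]
      have hhead : (((x :: ws).count x : Int), x) = ((1 + (ws.count x : Int)), x) := by
        simp [List.count_cons_self]
        ring
      rw [hhead]
      simp

lemma rle_spec (ws : List String) (h : ws.Pairwise (· ≤ ·)) :
    ws.foldl rstep [] = (keysOf ws).map (fun k => ((ws.count k : Int), k)) := by
  cases ws with
  | nil => simp [keysOf]
  | cons w ws =>
    rw [List.foldl_cons]
    have hstep : rstep ([] : List (Int × String)) w = [] ++ [(1, w)] := by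
      simp [rstep]
    rw [hstep, run_lemma ws [] 1 w (List.Pairwise.of_cons h) (fun y hy => List.rel_of_pairwise_cons h hy), keysOf]
    have hmap : ((keysOf (ws.filter (fun y => decide (y ≠ w)))).map
          (fun k => (((w :: ws).count k : Int), k)))
        = (keysOf (ws.filter (fun y => decide (y ≠ w)))).map (fun k => ((ws.count k : Int), k)) := by
      apply List.map_congr_left
      intro k hk
      have hkw : k ≠ w := by
        have := (mem_keysOf _ k).mp hk
        have := List.mem_filter.mp this
        simpa using this.2
      simp [Ne.symm hkw]
    simp only [List.map_cons, hmap]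
    have hhead : (((w :: ws).count w : Int), w) = ((1 + (ws.count w : Int)), w) := by
      simp [List.count_cons_self]
      ring
    rw [hhead]
    simp

-- ===== VERDICT (by name: the statement is the Claim_ definition above) =====
theorem count_vegetables_spec : Claim_equal_count_vegetables := by
  intro string _
  unfold Spec_count_vegetables
  show count_vegetables string = count_vegetables_alt string
  simp only [count_vegetables, count_vegetables_alt]
  have hA : (PySem.Str.split₀ string).foldl
      (fun d item => if item ∉ vegNames then d else d.insert item (d.getD item 0 + 1))
      (PySem.Dict.empty : PySem.Dict String Int)
      = PySem.Dict.counter ((PySem.Str.split₀ string).filter (fun w => decide (w ∈ vegNames))) := by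
    have h1 : (fun (d : PySem.Dict String Int) item =>
          if item ∉ vegNames then d else d.insert item (d.getD item 0 + 1))
        = fun d item => if item ∈ vegNames then d.insert item (d.getD item 0 + 1) else d := by
      funext d item
      by_cases h : item ∈ vegNames <;> simp [h]
    rw [h1, PySem.List.foldl_ite_eq_foldl_filter (p := fun item => item ∈ vegNames)]
    rfl
  rw [hA, PySem.Dict.items_counter, List.map_map]
  have hwords := rle_spec
    (PySem.List.sorted ((PySem.Str.split₀ string).filter (fun w => decide (w ∈ vegNames))) (fun w => w) false)
    (PySem.List.sorted_pairwise _ (fun w => w))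
  rw [hwords]
  have hcnt : ∀ k, List.count k
        (PySem.List.sorted ((PySem.Str.split₀ string).filter (fun w => decide (w ∈ vegNames))) (fun w => w) false)
      = List.count k ((PySem.Str.split₀ string).filter (fun w => decide (w ∈ vegNames))) :=
    fun k => (PySem.List.sorted_perm _ (fun w => w) false).count_eq k
  have hmapB : (keysOf (PySem.List.sorted ((PySem.Str.split₀ string).filter (fun w => decide (w ∈ vegNames))) (fun w => w) false)).map
        (fun k => ((List.count k (PySem.List.sorted ((PySem.Str.split₀ string).filter (fun w => decide (w ∈ vegNames))) (fun w => w) false) : Int), k))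
      = (keysOf (PySem.List.sorted ((PySem.Str.split₀ string).filter (fun w => decide (w ∈ vegNames))) (fun w => w) false)).map
        (fun k => ((List.count k ((PySem.Str.split₀ string).filter (fun w => decide (w ∈ vegNames))) : Int), k)) := by
    apply List.map_congr_left
    intro k _
    rw [hcnt k]
  rw [hmapB]
  apply sorted2_rev_congr_perm
  have hperm : (PySem.Set.ofList ((PySem.Str.split₀ string).filter (fun w => decide (w ∈ vegNames)))).Perm
      (keysOf (PySem.List.sorted ((PySem.Str.split₀ string).filter (fun w => decide (w ∈ vegNames))) (fun w => w) false)) := by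
    rw [List.perm_ext_iff_of_nodup (PySem.Set.nodup_ofList _) (nodup_keysOf _)]
    intro a
    rw [PySem.Set.mem_ofList, mem_keysOf, PySem.List.mem_sorted]
  exact hperm.map _
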